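-- pv_equiv track=rewrite | github.com/bradan-quantum/qframe | src/qframe/alg_primitives/maj.py | majority_function
-- ===== SOURCE A (Python) =====
-- def _bit(b, j):
--     return ((0b1 << j) & b) >> j
--
-- def majority_function(a: int, b: int, c: int, width=1) -> int:
--     if (a.bit_length() > width) or (b.bit_length() > width) or (c.bit_length() > width):
--         raise Exception(f'Arguments a, b, c greater than specified bit width {width}')
--     result = 0
--     for i in range(width):
--         ai = _bit(a, i)
--         bi = _bit(b, i)
--         ci = _bit(c, i)
--         result |= ( (ai * bi) ^ (bi * ci) ^ (ci * ai) ) << i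
--     return result
-- ===== SOURCE B (Python) =====
-- def majority_function(a: int, b: int, c: int, width=1) -> int:
--     if (a.bit_length() > width) or (b.bit_length() > width) or (c.bit_length() > width):
--         raise Exception(f'Arguments a, b, c greater than specified bit width {width}')
--     return ((a & b) | (b & c) | (c & a)) & ((1 << width) - 1)
-- ===== Notes on version B (the rewrite author's own statement) =====
-- stated objective: faster
-- what changed: Replaces the per-bit Python loop (extract each bit of a, b, c, combine with *//^, shift back in) by a single whole-integer bitwise expression (a&b)|(b&c)|(c&a) masked to width bits, keeping the original width guard.
import Mathlib
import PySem

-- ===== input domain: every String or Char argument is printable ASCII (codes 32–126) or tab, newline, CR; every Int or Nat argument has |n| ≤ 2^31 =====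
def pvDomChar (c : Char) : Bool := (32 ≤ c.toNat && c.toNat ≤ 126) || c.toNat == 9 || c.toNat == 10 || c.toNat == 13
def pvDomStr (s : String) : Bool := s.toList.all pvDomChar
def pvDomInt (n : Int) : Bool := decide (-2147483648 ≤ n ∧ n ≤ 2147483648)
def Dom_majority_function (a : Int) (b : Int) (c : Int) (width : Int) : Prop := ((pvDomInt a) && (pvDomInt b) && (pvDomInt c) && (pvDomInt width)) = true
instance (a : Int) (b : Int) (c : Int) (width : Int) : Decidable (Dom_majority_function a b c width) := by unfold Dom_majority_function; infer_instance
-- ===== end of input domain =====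

-- B replaces A's per-bit loop by one whole-integer bitwise expression masked to `width` bits; the width guard of A raises, those inputs are excluded by Pre_.

-- ===== PORT A =====
-- Python helper _bit(b, j): ((0b1 << j) & b) >> j; j comes from range(width), so j ≥ 0 and j.toNat is exact
def pvBitA (b : Int) (j : Int) : Int :=
  PySem.Int.band ((1 : Int) <<< j.toNat) b >>> j.toNat

def majority_function (a : Int) (b : Int) (c : Int) (width : Int) : Int :=
  -- the Python guard `bit_length > width` raises; those inputs are excluded by Pre_majority_function
  (PySem.List.pyRange 0 width 1).foldl
    (fun result i =>
      let ai := pvBitA a i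
      let bi := pvBitA b i
      let ci := pvBitA c i
      PySem.Int.bor result
        (PySem.Int.bxor (PySem.Int.bxor (ai * bi) (bi * ci)) (ci * ai) <<< i.toNat))
    0

-- ===== PORT B =====
def majority_function_alt (a : Int) (b : Int) (c : Int) (width : Int) : Int :=
  -- same guard as A (raise), excluded by Pre_; then ((a & b) | (b & c) | (c & a)) & ((1 << width) - 1)
  PySem.Int.band
    (PySem.Int.bor (PySem.Int.bor (PySem.Int.band a b) (PySem.Int.band b c)) (PySem.Int.band c a))
    (((1 : Int) <<< width.toNat) - 1)

-- ===== PRECONDITION & SPEC =====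
-- Pre_ excludes exactly the inputs where A's guard raises: some argument's bit_length exceeds width
def Pre_majority_function (a : Int) (b : Int) (c : Int) (width : Int) : Prop :=
  (PySem.Int.bitLength a : Int) ≤ width ∧ (PySem.Int.bitLength b : Int) ≤ width ∧ (PySem.Int.bitLength c : Int) ≤ width
instance (a : Int) (b : Int) (c : Int) (width : Int) : Decidable (Pre_majority_function a b c width) := by unfold Pre_majority_function; infer_instance

def pvWitness_majority_function : Int × Int × Int × Int := (5, -3, 6, 4)

def Spec_majority_function (a : Int) (b : Int) (c : Int) (width : Int) (out : Int) : Prop := out = majority_function_alt a b c width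
instance (a : Int) (b : Int) (c : Int) (width : Int) (out : Int) : Decidable (Spec_majority_function a b c width out) := by unfold Spec_majority_function; infer_instance

-- ===== CLAIM (what is proved, stated in full; the proofs are below) =====
def Claim_equal_majority_function : Prop := ∀ (a : Int) (b : Int) (c : Int) (width : Int), Dom_majority_function a b c width → Pre_majority_function a b c width → Spec_majority_function a b c width (majority_function a b c width)

-- ===== LEMMAS AND PROOFS =====

theorem pvNegSuccAux (m : Nat) : (-(Int.negSucc m) - 1).toNat = m := by
  have h : (-(Int.negSucc m) - 1) = (m : Int) := by rw [Int.negSucc_eq]; ring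
  rw [h, Int.toNat_natCast]

theorem pvSubAnd (m : Nat) : ∀ n : Nat, m - (m &&& n) = m.ldiff n := by
  induction m using Nat.binaryRec with
  | zero => intro n; simp [Nat.ldiff]
  | bit b m ih =>
    intro n
    rw [← Nat.bit_bodd_div2 n, Nat.land_bit, Nat.ldiff_bit]
    have hle : m &&& n.div2 ≤ m := Nat.and_le_left
    have h2 := ih n.div2
    cases b <;> cases n.bodd <;> simp [Nat.bit_val, ← h2] <;> omega

theorem pvBandLand (a b : Int) : PySem.Int.band a b = Int.land a b := by
  rcases a with m | m <;> rcases b with n | n <;>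
      simp only [PySem.Int.band, Int.land, Int.ofNat_eq_natCast, pvNegSuccAux,
        Int.toNat_natCast] <;>
      split_ifs <;>
      first
        | (exfalso; omega)
        | rfl
        | rw [pvSubAnd]
        | rw [Nat.land_comm, pvSubAnd]
        | (rw [Int.negSucc_eq]; push_cast; ring)

theorem pvBorLor (a b : Int) : PySem.Int.bor a b = Int.lor a b := by
  rcases a with m | m <;> rcases b with n | n <;>
      simp only [PySem.Int.bor, Int.lor, Int.ofNat_eq_natCast, pvNegSuccAux,
        Int.toNat_natCast] <;>
      split_ifs <;>
      first
        | (exfalso; omega)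
        | rfl
        | (rw [pvSubAnd, Int.negSucc_eq]; push_cast; ring)
        | (rw [Nat.land_comm, pvSubAnd, Int.negSucc_eq]; push_cast; ring)
        | (rw [Int.negSucc_eq]; push_cast; ring)

theorem pvIntExt {a b : Int} (h : ∀ k, a.testBit k = b.testBit k) : a = b := by
  have key : ∀ (m n : Nat), (∀ k, (Int.ofNat m).testBit k = (Int.negSucc n).testBit k) → False := by
    intro m n hk
    have hm : m.testBit (m + n) = false :=
      Nat.testBit_eq_false_of_lt (lt_of_lt_of_le m.lt_two_pow_self
        (Nat.pow_le_pow_right (by norm_num) (Nat.le_add_right m n)))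
    have hn : n.testBit (m + n) = false :=
      Nat.testBit_eq_false_of_lt (lt_of_lt_of_le n.lt_two_pow_self
        (Nat.pow_le_pow_right (by norm_num) (Nat.le_add_left n m)))
    have := hk (m + n)
    simp [Int.testBit, hm, hn] at this
  rcases a with m | m <;> rcases b with n | n
  · exact congrArg _ (Nat.eq_of_testBit_eq fun k => by simpa [Int.testBit] using h k)
  · exact absurd h (fun hh => key m n hh)
  · exact absurd (fun k => (h k).symm) (fun hh => key n m hh)
  · exact congrArg _ (Nat.eq_of_testBit_eq fun k => by
      have := h k; simpa [Int.testBit] using this)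

-- 0/1 indicator of a bit, as an Int
def bI (t : Bool) : Int := if t then 1 else 0

theorem pvOneShl (n : Nat) : ((1 : Int) <<< n) = ((2 ^ n : Nat) : Int) := by
  rw [Int.shiftLeft_eq]; push_cast; ring

theorem pvLdiffTwoPow (n m : Nat) : (2 ^ n).ldiff m = 2 ^ n * (!m.testBit n).toNat := by
  apply Nat.eq_of_testBit_eq
  intro k
  by_cases h : n = k
  · subst h
    cases hm : m.testBit n <;> simp [Nat.testBit_ldiff, hm]
  · cases hm : m.testBit n <;> simp [Nat.testBit_ldiff, h]

theorem pvBitAChar (x : Int) (n : Nat) : pvBitA x ((n : Nat) : Int) = bI (x.testBit n) := by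
  unfold pvBitA
  rw [Int.toNat_natCast, pvBandLand, pvOneShl]
  rcases x with m | m
  · have h1 : Int.land ((2 ^ n : Nat) : Int) (Int.ofNat m) = Int.ofNat (2 ^ n &&& m) := rfl
    rw [h1, Nat.two_pow_and]
    show Int.ofNat ((2 ^ n * (m.testBit n).toNat) >>> n) = _
    rw [Nat.shiftRight_eq_div_pow, Nat.mul_div_cancel_left _ (Nat.two_pow_pos n)]
    cases h : m.testBit n <;> simp [Int.testBit, bI, h]
  · have h1 : Int.land ((2 ^ n : Nat) : Int) (Int.negSucc m) = Int.ofNat ((2 ^ n).ldiff m) := rfl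
    rw [h1, pvLdiffTwoPow]
    show Int.ofNat ((2 ^ n * (!m.testBit n).toNat) >>> n) = _
    rw [Nat.shiftRight_eq_div_pow, Nat.mul_div_cancel_left _ (Nat.two_pow_pos n)]
    cases h : m.testBit n <;> simp [Int.testBit, bI, h]

theorem pvTestBitNatCast (k : Nat) (m : Nat) : ((m : Nat) : Int).testBit k = m.testBit k := rfl

-- or-ing the n-th bit of M into its low-n-bit mask extends the mask by one bit
theorem pvMaskStep (M : Int) (n : Nat) :
    Int.lor (Int.land M ((2 ^ n - 1 : Nat) : Int)) (bI (M.testBit n) <<< n)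
      = Int.land M ((2 ^ (n + 1) - 1 : Nat) : Int) := by
  apply pvIntExt
  intro k
  rw [Int.testBit_lor, Int.testBit_land, Int.testBit_land, pvTestBitNatCast, pvTestBitNatCast,
    Nat.testBit_two_pow_sub_one, Nat.testBit_two_pow_sub_one]
  have hsh : (bI (M.testBit n) <<< n).testBit k = (M.testBit n && decide (n = k)) := by
    cases h : M.testBit n
    · simp [bI, Int.zero_shiftLeft, Int.testBit]
    · rw [bI]
      simp only [if_true]
      rw [pvOneShl, pvTestBitNatCast, Nat.testBit_two_pow]
      simp
  rw [hsh]
  rcases Nat.lt_trichotomy k n with h | h | h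
  · simp [Nat.lt_succ_of_lt h, h, Nat.ne_of_gt h]
  · subst h
    simp
  · have h1 : ¬ (k < n) := by omega
    have h2 : ¬ (k < n + 1) := by omega
    simp [h1, h2, Nat.ne_of_lt h]

-- the whole-integer majority expression, written with Mathlib's Int bitwise ops
def pvM (a b c : Int) : Int := Int.lor (Int.lor (Int.land a b) (Int.land b c)) (Int.land c a)

theorem pvMTestBit (a b c : Int) (k : Nat) :
    (pvM a b c).testBit k = ((a.testBit k && b.testBit k || b.testBit k && c.testBit k)
      || c.testBit k && a.testBit k) := by
  unfold pvM
  rw [Int.testBit_lor, Int.testBit_lor, Int.testBit_land, Int.testBit_land, Int.testBit_land]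

-- the xor-of-products combination of three 0/1 bits is their majority bit
theorem pvMajBit (ta tb tc : Bool) :
    PySem.Int.bxor (PySem.Int.bxor (bI ta * bI tb) (bI tb * bI tc)) (bI tc * bI ta)
      = bI ((ta && tb || tb && tc) || tc && ta) := by
  cases ta <;> cases tb <;> cases tc <;> decide

-- A's loop over range(n) produces exactly B's masked majority value
theorem pvFold (a b c : Int) (n : Nat) :
    (PySem.List.pyRange 0 ((n : Nat) : Int) 1).foldl
      (fun result i =>
        let ai := pvBitA a i
        let bi := pvBitA b i
        let ci := pvBitA c i
        PySem.Int.bor result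
          (PySem.Int.bxor (PySem.Int.bxor (ai * bi) (bi * ci)) (ci * ai) <<< i.toNat))
      0
    = Int.land (pvM a b c) ((2 ^ n - 1 : Nat) : Int) := by
  induction n with
  | zero =>
    have h : PySem.List.pyRange 0 ((0 : Nat) : Int) 1 = [] := by decide
    rw [h]
    apply pvIntExt
    intro k
    rw [Int.testBit_land]
    simp [Int.testBit]
  | succ n ih =>
    have hcast : (((n + 1 : Nat)) : Int) = ((n : Nat) : Int) + 1 := by push_cast; ring
    rw [hcast, PySem.List.pyRange_one_succ_right (by positivity), List.foldl_append]
    simp only [List.foldl_cons, List.foldl_nil]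
    rw [ih, pvBitAChar, pvBitAChar, pvBitAChar, pvMajBit, Int.toNat_natCast, ← pvMTestBit,
      pvBorLor, pvMaskStep]

-- ===== VERDICT (by name: the statement is the Claim_ definition above) =====
theorem majority_function_spec : Claim_equal_majority_function := by
  intro a b c width _ _
  unfold Spec_majority_function majority_function majority_function_alt
  rw [pvBandLand, pvBorLor, pvBorLor, pvBandLand, pvBandLand, pvBandLand]
  by_cases hw : 0 ≤ width
  · have h1 : width = ((width.toNat : Nat) : Int) := (Int.toNat_of_nonneg hw).symm
    rw [h1, pvFold a b c width.toNat, Int.toNat_natCast]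
    congr 1
    rw [pvOneShl]
    have : (1 : Nat) ≤ 2 ^ width.toNat := Nat.one_le_two_pow
    push_cast [this]
    ring
  · have hr : PySem.List.pyRange 0 width 1 = [] := by
      unfold PySem.List.pyRange
      rw [if_neg (by norm_num)]
      simp only
      rw [if_pos (by norm_num), if_neg (by omega)]
      simp
    have ht : width.toNat = 0 := by omega
    rw [hr, ht]
    apply pvIntExt
    intro k
    rw [Int.testBit_land]
    simp [Int.testBit]
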